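-- pv_equiv track=rewrite | github.com/QuynhHuongVuPXL/ITEssentials | oefeningen/6_strings/extra8.py | vervorm
-- ===== SOURCE A (Python) =====
-- def vervorm(tekst):
--     groep1 = ""
--     groep2 = ""
--     groep3 = ""
--
--     for i in range(len(tekst)):
--         if i % 3 == 0:
--             groep1 += tekst[i]
--         elif i % 3 == 1:
--             groep2 += tekst[i]
--         else:
--             groep3 += tekst[i]
--
--     return groep1 + groep2 + groep3
-- ===== SOURCE B (Python) =====
-- def vervorm(tekst):
--     return ''.join(c for _, c in sorted(enumerate(tekst), key=lambda p: p[0] % 3))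
-- ===== Notes on version B (the rewrite author's own statement) =====
-- stated objective: alternative
-- what changed: B replaces A's three string accumulators and per-index mod-3 branching with a stable sort of the enumerated characters by index mod 3, relying on sort stability to preserve within-group order, then joins the characters.
import Mathlib
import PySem

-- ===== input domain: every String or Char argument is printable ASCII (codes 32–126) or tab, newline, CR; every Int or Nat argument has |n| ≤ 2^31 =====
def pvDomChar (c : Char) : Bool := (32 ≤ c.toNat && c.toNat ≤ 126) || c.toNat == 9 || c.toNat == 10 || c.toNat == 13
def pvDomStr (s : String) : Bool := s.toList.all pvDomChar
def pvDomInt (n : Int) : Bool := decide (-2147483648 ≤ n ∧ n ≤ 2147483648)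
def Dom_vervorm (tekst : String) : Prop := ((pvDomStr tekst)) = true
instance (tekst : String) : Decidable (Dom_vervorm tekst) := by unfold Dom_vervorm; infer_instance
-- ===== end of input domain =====

-- B sorts the enumerated characters stably by index mod 3 and joins them, instead of
-- A's per-index loop that branches on i % 3 into three accumulators (objective: alternative).

-- ===== PORT A =====
-- one iteration of A's loop body: branch on i % 3, append tekst[i] to the matching group
def stepA (cs : List Char) (g : List Char × List Char × List Char) (i : Int) :
    List Char × List Char × List Char :=
  if PySem.Int.mod i 3 = 0 then (g.1 ++ [PySem.List.pyGetD cs i ' '], g.2.1, g.2.2)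
  else if PySem.Int.mod i 3 = 1 then (g.1, g.2.1 ++ [PySem.List.pyGetD cs i ' '], g.2.2)
  else (g.1, g.2.1, g.2.2 ++ [PySem.List.pyGetD cs i ' '])

-- A's loop: for i in range(len(tekst))
def loopA (cs : List Char) (g : List Char × List Char × List Char) :
    List Char × List Char × List Char :=
  (PySem.List.pyRange 0 (cs.length : Int) 1).foldl (stepA cs) g

def vervorm (tekst : String) : String :=
  let g := loopA tekst.toList ([], [], [])
  String.ofList (g.1 ++ (g.2.1 ++ g.2.2))

-- ===== PORT B =====
-- sorted(enumerate(tekst), key=lambda p: p[0] % 3), then ''.join of the characters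
def vervorm_alt (tekst : String) : String :=
  let pairs := PySem.List.sorted (PySem.List.enumerate tekst.toList 0)
    (fun p => PySem.Int.mod p.1 3) false
  String.ofList (pairs.map (fun p => p.2))

-- ===== PRECONDITION & SPEC =====
def Spec_vervorm (tekst : String) (out : String) : Prop := out = vervorm_alt tekst
instance (tekst : String) (out : String) : Decidable (Spec_vervorm tekst out) := by unfold Spec_vervorm; infer_instance

-- ===== CLAIM (what is proved, stated in full; the proofs are below) =====
def Claim_equal_vervorm : Prop := ∀ (tekst : String), Dom_vervorm tekst → Spec_vervorm tekst (vervorm tekst)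

-- ===== LEMMAS AND PROOFS =====

-- the key used by B's sort
def pvKey (p : Int × Char) : Int := PySem.Int.mod p.1 3

-- A's loop body, rephrased on (index, char) pairs
def stepP (g : List Char × List Char × List Char) (p : Int × Char) :
    List Char × List Char × List Char :=
  if pvKey p = 0 then (g.1 ++ [p.2], g.2.1, g.2.2)
  else if pvKey p = 1 then (g.1, g.2.1 ++ [p.2], g.2.2)
  else (g.1, g.2.1, g.2.2 ++ [p.2])

lemma pvKey_range (p : Int × Char) : pvKey p = 0 ∨ pvKey p = 1 ∨ pvKey p = 2 := by
  unfold pvKey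
  rw [PySem.Int.mod_eq_emod_of_pos (by norm_num : (0:Int) < 3)]
  omega

-- inserting x between the elements it is not "before" and those it is "before"
lemma insertBy_split {α : Type} (before : α → α → Bool) (x : α) (l r : List α)
    (hl : ∀ y ∈ l, before x y = false) (hr : ∀ y ∈ r, before x y = true) :
    PySem.List.insertBy before x (l ++ r) = l ++ x :: r := by
  induction l with
  | nil =>
    cases r with
    | nil => simp [PySem.List.insertBy]
    | cons y ys => simp [PySem.List.insertBy, hr y (by simp)]
  | cons a l ih =>
    have ha : before x a = false := hl a (by simp)
    simp only [List.cons_append, PySem.List.insertBy, ha]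
    simp only [Bool.false_eq_true, if_false, List.cons.injEq, true_and]
    exact ih (fun y hy => hl y (by simp [hy]))

-- the insertion fold of B's sort keeps the accumulator grouped as (key 0) ++ (key 1) ++ (key 2)
lemma foldl_ins_grouped : ∀ (ps : List (Int × Char)) (A0 A1 A2 : List (Int × Char)),
    (∀ p ∈ A0, pvKey p = 0) → (∀ p ∈ A1, pvKey p = 1) → (∀ p ∈ A2, pvKey p = 2) →
    ps.foldl (fun acc x => PySem.List.insertBy (fun a b => decide (pvKey a < pvKey b)) x acc)
      (A0 ++ A1 ++ A2)
    = (A0 ++ ps.filter (fun p => pvKey p = 0))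
      ++ (A1 ++ ps.filter (fun p => pvKey p = 1))
      ++ (A2 ++ ps.filter (fun p => pvKey p = 2)) := by
  intro ps
  induction ps with
  | nil => intro A0 A1 A2 _ _ _; simp
  | cons p ps ih =>
    intro A0 A1 A2 h0 h1 h2
    simp only [List.foldl_cons]
    rcases pvKey_range p with hk | hk | hk
    · have : PySem.List.insertBy (fun a b => decide (pvKey a < pvKey b)) p (A0 ++ A1 ++ A2)
          = (A0 ++ [p]) ++ A1 ++ A2 := by
        rw [List.append_assoc]
        rw [insertBy_split _ p A0 (A1 ++ A2)
          (fun y hy => by simp [hk, h0 y hy])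
          (fun y hy => by
            rcases List.mem_append.mp hy with h | h
            · simp [hk, h1 y h]
            · simp [hk, h2 y h])]
        simp
      rw [this, ih (A0 ++ [p]) A1 A2
        (fun y hy => by rcases List.mem_append.mp hy with h | h
                        · exact h0 y h
                        · simp at h; subst h; exact hk)
        h1 h2]
      simp [hk, List.append_assoc]
    · have : PySem.List.insertBy (fun a b => decide (pvKey a < pvKey b)) p (A0 ++ A1 ++ A2)
          = A0 ++ (A1 ++ [p]) ++ A2 := by
        have := insertBy_split (fun a b => decide (pvKey a < pvKey b)) p (A0 ++ A1) A2
          (fun y hy => by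
            rcases List.mem_append.mp hy with h | h
            · simp [hk, h0 y h]
            · simp [hk, h1 y h])
          (fun y hy => by simp [hk, h2 y hy])
        rw [List.append_assoc A0 A1 A2] at this ⊢
        rw [this]
        simp
      rw [this, ih A0 (A1 ++ [p]) A2 h0
        (fun y hy => by rcases List.mem_append.mp hy with h | h
                        · exact h1 y h
                        · simp at h; subst h; exact hk)
        h2]
      simp [hk, List.append_assoc]
    · have : PySem.List.insertBy (fun a b => decide (pvKey a < pvKey b)) p (A0 ++ A1 ++ A2)
          = A0 ++ A1 ++ (A2 ++ [p]) := by
        have := insertBy_split (fun a b => decide (pvKey a < pvKey b)) p (A0 ++ A1 ++ A2) []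
          (fun y hy => by
            rcases List.mem_append.mp hy with h | h
            · rcases List.mem_append.mp h with h' | h'
              · simp [hk, h0 y h']
              · simp [hk, h1 y h']
            · simp [hk, h2 y h])
          (fun y hy => by simp at hy)
        simpa [List.append_assoc] using this
      rw [this, ih A0 A1 (A2 ++ [p]) h0 h1
        (fun y hy => by rcases List.mem_append.mp hy with h | h
                        · exact h2 y h
                        · simp at h; subst h; exact hk)]
      simp [hk, List.append_assoc]

-- A's pair-level fold produces exactly the three filtered-and-projected groups
lemma foldl_stepP : ∀ (ps : List (Int × Char)) (g1 g2 g3 : List Char),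
    ps.foldl stepP (g1, g2, g3)
    = (g1 ++ (ps.filter (fun p => pvKey p = 0)).map (fun p => p.2),
       g2 ++ (ps.filter (fun p => pvKey p = 1)).map (fun p => p.2),
       g3 ++ (ps.filter (fun p => pvKey p = 2)).map (fun p => p.2)) := by
  intro ps
  induction ps with
  | nil => intro g1 g2 g3; simp
  | cons p ps ih =>
    intro g1 g2 g3
    simp only [List.foldl_cons]
    rcases pvKey_range p with hk | hk | hk <;>
      simp [stepP, hk, ih, List.append_assoc]

-- A's index loop is the pair fold over enumerate
lemma loopA_eq_foldl_stepP (cs : List Char) (g : List Char × List Char × List Char) :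
    loopA cs g = (PySem.List.enumerate cs 0).foldl stepP g := by
  rw [loopA, PySem.List.enumerate_eq_map_pyRange cs ' ', List.foldl_map]
  apply PySem.List.foldl_congr_mem
  intro acc i _
  simp [stepA, stepP, pvKey]

-- ===== VERDICT (by name: the statement is the Claim_ definition above) =====
theorem vervorm_spec : Claim_equal_vervorm := by
  intro tekst _
  unfold Spec_vervorm vervorm vervorm_alt
  rw [loopA_eq_foldl_stepP, foldl_stepP]
  rw [show (PySem.List.sorted (PySem.List.enumerate tekst.toList 0)
        (fun p => PySem.Int.mod p.1 3) false)
      = PySem.List.sorted (PySem.List.enumerate tekst.toList 0) pvKey false from rfl]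
  rw [PySem.List.sorted_eq_foldl_insertBy]
  have := foldl_ins_grouped (PySem.List.enumerate tekst.toList 0) [] [] []
    (by simp) (by simp) (by simp)
  simp only [List.append_nil, List.nil_append] at this
  rw [this]
  simp [List.append_assoc]
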